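-- pv_equiv track=rewrite | github.com/hussainweb/logseq-to-obsidian | src/logseq_converter/tana/converter.py | _remove_properties
-- ===== SOURCE A (Python) =====
-- from typing import Dict, List, Set, Tuple, Union
--
-- def _remove_properties(content: str, properties: Dict[str, str]) -> str:
--     """Remove lines that are properties from the content."""
--     if not properties:
--         return content
--
--     lines = content.split("\n")
--     cleaned_lines = []
--     for line in lines:
--         is_property = False
--         for key in properties:
--             # LogSeq properties are usually "key:: value"
--             # Check for key:: at start of line (ignoring whitespace)
--             if line.strip().lower().startswith(f"{key.lower()}::"):
--                 is_property = True
--                 break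
--         if not is_property:
--             cleaned_lines.append(line)
--
--     return "\n".join(cleaned_lines).strip()
-- ===== SOURCE B (Python) =====
-- def _is_property_line(s, keys):
--     # s is the stripped, lowercased line; a property match means some key k
--     # (lowercased) with s == k + "::" + rest, i.e. "::" occurs at index len(k)
--     # and the text before that occurrence is a known key.
--     return any(s[i:i + 2] == "::" and s[:i] in keys for i in range(len(s) - 1))
--
--
-- def _remove_properties(content, properties):
--     """Remove lines that are properties from the content."""
--     if not properties:
--         return content
--
--     keys = {key.lower() for key in properties}
--     kept = [
--         line
--         for line in content.split("\n")
--         if not _is_property_line(line.strip().lower(), keys)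
--     ]
--     return "\n".join(kept).strip()
-- ===== Notes on version B (the rewrite author's own statement) =====
-- stated objective: faster
-- what changed: Per line, instead of testing startswith(key+'::') for every key, B builds a hash set of lowercased keys once and checks, at each occurrence of '::' in the stripped lowercased line, whether the text before it is in the set.
import Mathlib
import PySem

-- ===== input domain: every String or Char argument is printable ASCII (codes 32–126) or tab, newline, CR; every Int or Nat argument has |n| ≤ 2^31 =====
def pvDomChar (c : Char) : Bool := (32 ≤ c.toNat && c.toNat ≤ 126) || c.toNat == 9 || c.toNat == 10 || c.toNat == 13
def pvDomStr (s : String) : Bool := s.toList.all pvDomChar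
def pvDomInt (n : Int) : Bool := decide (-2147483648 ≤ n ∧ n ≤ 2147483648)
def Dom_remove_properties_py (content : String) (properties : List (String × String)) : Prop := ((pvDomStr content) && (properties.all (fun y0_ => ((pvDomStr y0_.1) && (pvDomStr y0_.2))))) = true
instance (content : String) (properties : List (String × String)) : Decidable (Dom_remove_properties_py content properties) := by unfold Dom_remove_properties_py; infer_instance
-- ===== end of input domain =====

-- B replaces A's per-key startswith loop by a set of lowercased keys built once plus one lookup
-- at each '::' occurrence of the stripped lowercased line (alternative algorithm, same result).

-- ===== PORT A =====
def remove_properties_py (content : String) (properties : List (String × String)) : String :=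
  if properties = [] then content
  else
    let lines := PySem.Chars.splitOn content.toList ['\n']
    let cleaned_lines := lines.foldl (fun acc line =>
      let is_property := properties.any (fun kv =>
        PySem.Chars.startswith (PySem.Chars.lower (PySem.Chars.strip line))
          (PySem.Chars.lower kv.1.toList ++ [':', ':']))
      if is_property then acc else acc ++ [line]) []
    String.ofList (PySem.Chars.strip (PySem.Chars.join ['\n'] cleaned_lines))

-- ===== PORT B =====
-- Source B's _is_property_line: scan the '::' positions of s and look the text before each up in the key set
def pvIsPropertyLine (s : List Char) (keys : PySem.Set (List Char)) : Bool :=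
  (List.range (s.length - 1)).any (fun i =>
    decide (PySem.List.slice s (some (i : Int)) (some ((i : Int) + 2)) = [':', ':'])
      && keys.contains (PySem.List.slice s none (some (i : Int))))

def remove_properties_py_alt (content : String) (properties : List (String × String)) : String :=
  if properties = [] then content
  else
    let keys := PySem.Set.ofList (properties.map (fun kv => PySem.Chars.lower kv.1.toList))
    let kept := (PySem.Chars.splitOn content.toList ['\n']).filter
      (fun line => ! pvIsPropertyLine (PySem.Chars.lower (PySem.Chars.strip line)) keys)
    String.ofList (PySem.Chars.strip (PySem.Chars.join ['\n'] kept))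

-- ===== PRECONDITION & SPEC =====
def Spec_remove_properties_py (content : String) (properties : List (String × String)) (out : String) : Prop := out = remove_properties_py_alt content properties
instance (content : String) (properties : List (String × String)) (out : String) : Decidable (Spec_remove_properties_py content properties out) := by unfold Spec_remove_properties_py; infer_instance

-- ===== CLAIM (what is proved, stated in full; the proofs are below) =====
def Claim_equal_remove_properties_py : Prop := ∀ (content : String) (properties : List (String × String)), Dom_remove_properties_py content properties → Spec_remove_properties_py content properties (remove_properties_py content properties)

-- ===== LEMMAS AND PROOFS =====

-- some key k has (k ++ "::") as a prefix of s  ⟺  some position i of s carries "::" with a known key before it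
theorem pv_any_startswith_eq (ks : List (List Char)) (s : List Char) :
    ks.any (fun k => PySem.Chars.startswith s (k ++ [':', ':']))
      = pvIsPropertyLine s (PySem.Set.ofList ks) := by
  rw [Bool.eq_iff_iff]
  simp only [pvIsPropertyLine, List.any_eq_true, List.mem_range, Bool.and_eq_true,
    decide_eq_true_eq, PySem.Set.contains_iff, PySem.Set.mem_ofList,
    PySem.Chars.startswith_iff]
  constructor
  · rintro ⟨k, hk, hpre⟩
    have hlen : k.length + 2 ≤ s.length := by
      have := hpre.length_le; simp [List.length_append] at this; omega
    have heq : k ++ [':', ':'] = s.take (k.length + 2) := by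
      have := List.prefix_iff_eq_take.mp hpre
      simpa using this
    rw [List.take_add] at heq
    have hinj := List.append_inj heq (by simp [List.length_take]; omega)
    refine ⟨k.length, by omega, ?_, ?_⟩
    · have hcast : ((k.length : Int) + 2) = ((k.length + 2 : Nat) : Int) := by push_cast; ring
      rw [hcast, PySem.List.slice_natCast]
      have h2 : k.length + 2 - k.length = 2 := by omega
      rw [h2]
      exact hinj.2.symm
    · rw [PySem.List.slice_to_natCast, ← hinj.1]
      exact hk
  · rintro ⟨i, hi, hsl, hmem⟩
    rw [PySem.List.slice_to_natCast] at hmem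
    refine ⟨s.take i, hmem, ?_⟩
    have hcast : ((i : Int) + 2) = ((i + 2 : Nat) : Int) := by push_cast; ring
    rw [hcast, PySem.List.slice_natCast] at hsl
    have h2 : i + 2 - i = 2 := by omega
    rw [h2] at hsl
    have htk : s.take i ++ [':', ':'] = s.take (i + 2) := by
      rw [List.take_add, hsl]
    rw [htk]
    exact List.take_prefix _ _

-- ===== VERDICT (by name: the statement is the Claim_ definition above) =====
theorem remove_properties_py_spec : Claim_equal_remove_properties_py := by
  intro content properties _
  unfold Spec_remove_properties_py remove_properties_py remove_properties_py_alt
  by_cases h : properties = []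
  · simp [h]
  · simp only [if_neg h]
    congr 3
    have hstep : ∀ (acc : List (List Char)) (line : List Char),
        (let is_property := properties.any (fun kv =>
           PySem.Chars.startswith (PySem.Chars.lower (PySem.Chars.strip line))
             (PySem.Chars.lower kv.1.toList ++ [':', ':']))
         if is_property then acc else acc ++ [line])
        = (if (! pvIsPropertyLine (PySem.Chars.lower (PySem.Chars.strip line))
              (PySem.Set.ofList (properties.map (fun kv => PySem.Chars.lower kv.1.toList)))) = true
           then acc ++ [id line] else acc) := by
      intro acc line
      have hany : properties.any (fun kv =>
          PySem.Chars.startswith (PySem.Chars.lower (PySem.Chars.strip line))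
            (PySem.Chars.lower kv.1.toList ++ [':', ':']))
          = pvIsPropertyLine (PySem.Chars.lower (PySem.Chars.strip line))
            (PySem.Set.ofList (properties.map (fun kv => PySem.Chars.lower kv.1.toList))) := by
        rw [← pv_any_startswith_eq, List.any_map]
        rfl
      simp only [hany]
      cases pvIsPropertyLine (PySem.Chars.lower (PySem.Chars.strip line))
        (PySem.Set.ofList (properties.map (fun kv => PySem.Chars.lower kv.1.toList))) <;> simp
    calc (PySem.Chars.splitOn content.toList ['\n']).foldl (fun acc line =>
            let is_property := properties.any (fun kv =>
              PySem.Chars.startswith (PySem.Chars.lower (PySem.Chars.strip line))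
                (PySem.Chars.lower kv.1.toList ++ [':', ':']))
            if is_property then acc else acc ++ [line]) []
        = (PySem.Chars.splitOn content.toList ['\n']).foldl (fun acc line =>
            if (! pvIsPropertyLine (PySem.Chars.lower (PySem.Chars.strip line))
              (PySem.Set.ofList (properties.map (fun kv => PySem.Chars.lower kv.1.toList)))) = true
            then acc ++ [id line] else acc) [] := by
          exact PySem.List.foldl_congr_mem _ _ _ _ (fun acc x _ => hstep acc x)
      _ = _ := by
          rw [PySem.List.foldl_append_if]
          simp
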